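-- pv_equiv track=rewrite | github.com/costantinoai/chess-expertise-2025 | common/report_utils.py | _escape_header_percents
-- ===== SOURCE A (Python) =====
-- def _escape_header_percents(latex_table: str) -> str:
--     """Escape % signs in the header row when not using multicolumn headers."""
--     lines = latex_table.split('\n')
--     toprule_idx = None
--     header_idx = None
--     for i, line in enumerate(lines):
--         if '\\toprule' in line:
--             toprule_idx = i
--         if toprule_idx is not None and i > toprule_idx and '&' in line and header_idx is None:
--             header_idx = i
--             break
--     if header_idx is None:
--         return latex_table
--     # Escape % outside math in the header row
--     row = lines[header_idx]
--     out = []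
--     in_math = False
--     for ch in row:
--         if ch == '$':
--             in_math = not in_math
--             out.append(ch)
--         elif ch == '%' and not in_math:
--             out.append(r'\%')
--         else:
--             out.append(ch)
--     lines[header_idx] = ''.join(out)
--     return '\n'.join(lines)
-- ===== SOURCE B (Python) =====
-- def _escape_header_percents(latex_table: str) -> str:
--     """Escape % signs in the header row when not using multicolumn headers."""
--     lines = latex_table.split('\n')
--     t = next((i for i, line in enumerate(lines) if '\\toprule' in line), None)
--     if t is None:
--         return latex_table
--     h = next((i for i in range(t + 1, len(lines))
--               if '&' in lines[i] and '\\toprule' not in lines[i]), None)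
--     if h is None:
--         return latex_table
--     segs = lines[h].split('$')
--     lines[h] = '$'.join(s.replace('%', r'\%') if k % 2 == 0 else s
--                         for k, s in enumerate(segs))
--     return '\n'.join(lines)
-- ===== Notes on version B (the rewrite author's own statement) =====
-- stated objective: simpler
-- what changed: B replaces A's single stateful header-finding loop by two successive searches (first toprule line, then the first later ampersand line), and replaces A's character-by-character in-math toggle scan with splitting the header row on the dollar sign, escaping percent only in even-parity segments, and rejoining.
import Mathlib
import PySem

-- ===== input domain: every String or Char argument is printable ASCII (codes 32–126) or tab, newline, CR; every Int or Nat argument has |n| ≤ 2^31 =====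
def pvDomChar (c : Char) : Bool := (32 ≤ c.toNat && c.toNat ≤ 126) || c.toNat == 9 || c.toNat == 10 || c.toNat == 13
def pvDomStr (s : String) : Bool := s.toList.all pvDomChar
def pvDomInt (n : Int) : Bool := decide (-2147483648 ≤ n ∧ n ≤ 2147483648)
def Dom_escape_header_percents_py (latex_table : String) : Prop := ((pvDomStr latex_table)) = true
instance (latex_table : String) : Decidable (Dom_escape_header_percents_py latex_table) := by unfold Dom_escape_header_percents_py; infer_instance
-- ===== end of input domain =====

-- B escapes '%' by splitting the header row on '$' and mapping only even-parity (outside-math)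
-- segments, replacing A's character-by-character toggle scan; objective: simpler decomposition.

-- ===== PORT A =====
-- A's single stateful loop: latest '\toprule' index + first later '&' line, breaking when found
def pvA_findHeader : List (List Char) → Nat → Option Nat → Option Nat
  | [], _, _ => none
  | line :: rest, i, topruleIdx =>
    let topruleIdx' := if PySem.Chars.isIn "\\toprule".toList line then some i else topruleIdx
    match topruleIdx' with
    | some t =>
      if t < i && PySem.Chars.isIn ['&'] line then some i
      else pvA_findHeader rest (i + 1) (some t)
    | none => pvA_findHeader rest (i + 1) none

-- A's character loop with the in_math toggle and the out accumulator
def pvA_escape : List Char → Bool → List Char → List Char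
  | [], _, out => out
  | ch :: rest, inMath, out =>
    if ch = '$' then pvA_escape rest (!inMath) (out ++ [ch])
    else if ch = '%' && !inMath then pvA_escape rest inMath (out ++ ['\\', '%'])
    else pvA_escape rest inMath (out ++ [ch])

def escape_header_percents_py (latex_table : String) : String :=
  let lines := PySem.Chars.splitOn latex_table.toList "\n".toList
  match pvA_findHeader lines 0 none with
  | none => latex_table
  | some h =>
    let row := lines.getD h []
    let out := pvA_escape row false []
    String.ofList (PySem.Chars.join "\n".toList (lines.set h out))

-- ===== PORT B =====
-- B's second search: first following line with '&' and without '\toprule'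
def pvB_searchHeader : List (List Char) → Option Nat
  | [] => none
  | line :: rest =>
    if PySem.Chars.isIn ['&'] line && !PySem.Chars.isIn "\\toprule".toList line then some 0
    else (pvB_searchHeader rest).map (· + 1)

def escape_header_percents_py_alt (latex_table : String) : String :=
  let lines := PySem.Chars.splitOn latex_table.toList "\n".toList
  match lines.findIdx? (fun line => PySem.Chars.isIn "\\toprule".toList line) with
  | none => latex_table
  | some t =>
    match (pvB_searchHeader (lines.drop (t + 1))).map (t + 1 + ·) with
    | none => latex_table
    | some h =>
      let segs := PySem.Chars.splitOn (lines.getD h []) ['$']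
      let newRow := PySem.Chars.join ['$'] ((PySem.List.enumerate segs).map
        (fun p => if PySem.Int.mod p.1 2 = 0 then PySem.Chars.replace p.2 ['%'] ['\\', '%'] else p.2))
      String.ofList (PySem.Chars.join "\n".toList (lines.set h newRow))

-- ===== PRECONDITION & SPEC =====
def Spec_escape_header_percents_py (latex_table : String) (out : String) : Prop := out = escape_header_percents_py_alt latex_table
instance (latex_table : String) (out : String) : Decidable (Spec_escape_header_percents_py latex_table out) := by unfold Spec_escape_header_percents_py; infer_instance

-- ===== CLAIM (what is proved, stated in full; the proofs are below) =====
def Claim_equal_escape_header_percents_py : Prop := ∀ (latex_table : String), Dom_escape_header_percents_py latex_table → Spec_escape_header_percents_py latex_table (escape_header_percents_py latex_table)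

-- ===== LEMMAS AND PROOFS =====

-- reference versions of split('$'), replace('%','\%') and A's escape, used only in the proofs
def pvSplitD : List Char → List (List Char)
  | [] => [[]]
  | c :: t =>
    if c = '$' then [] :: pvSplitD t
    else
      match pvSplitD t with
      | h :: r => (c :: h) :: r
      | [] => [[c]]

def pvReplD : List Char → List Char
  | [] => []
  | c :: t => if c = '%' then '\\' :: '%' :: pvReplD t else c :: pvReplD t

def pvE : List Char → Bool → List Char
  | [], _ => []
  | c :: t, m =>
    if c = '$' then c :: pvE t (!m)
    else if c = '%' && !m then '\\' :: '%' :: pvE t m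
    else c :: pvE t m

def pvMapPar : Bool → List (List Char) → List (List Char)
  | _, [] => []
  | m, h :: r => (if m then pvReplD h else h) :: pvMapPar (!m) r

lemma pvSplitD_ne_nil (s : List Char) : pvSplitD s ≠ [] := by
  cases s with
  | nil => simp [pvSplitD]
  | cons c t =>
    simp only [pvSplitD]
    split
    · simp
    · cases pvSplitD t <;> simp

lemma pv_splitOn_go (s : List Char) : ∀ (fuel : Nat) (cur : List Char) (acc : List (List Char)),
    s.length < fuel →
    PySem.Chars.splitOn.go ['$'] fuel s cur acc =
      acc.reverse ++ ((cur.reverse ++ (pvSplitD s).headI) :: (pvSplitD s).tail) := by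
  induction s with
  | nil =>
    intro fuel cur acc hf
    cases fuel with
    | zero => omega
    | succ f => simp [PySem.Chars.splitOn.go, pvSplitD]
  | cons c t ih =>
    intro fuel cur acc hf
    cases fuel with
    | zero => omega
    | succ f =>
      by_cases hc : c = '$'
      · subst hc
        have e : PySem.Chars.splitOn.go ['$'] (f + 1) ('$' :: t) cur acc =
            PySem.Chars.splitOn.go ['$'] f t [] (cur.reverse :: acc) := by
          simp [PySem.Chars.splitOn.go, List.isPrefixOf]
        rw [e, ih f [] (cur.reverse :: acc) (by simp at hf; omega)]
        cases hS : pvSplitD t with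
        | nil => exact absurd hS (pvSplitD_ne_nil t)
        | cons h r => simp [pvSplitD, hS]
      · have e : PySem.Chars.splitOn.go ['$'] (f + 1) (c :: t) cur acc =
            PySem.Chars.splitOn.go ['$'] f t (c :: cur) acc := by
          simp [PySem.Chars.splitOn.go, List.isPrefixOf]
          intro h; exact absurd h.symm hc
        rw [e, ih f (c :: cur) acc (by simp at hf; omega)]
        cases hS : pvSplitD t with
        | nil => exact absurd hS (pvSplitD_ne_nil t)
        | cons h r =>
          have hsp : pvSplitD (c :: t) = (c :: h) :: r := by simp [pvSplitD, hc, hS]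
          simp [hsp]

lemma pv_splitOn_eq (s : List Char) : PySem.Chars.splitOn s ['$'] = pvSplitD s := by
  show PySem.Chars.splitOn.go ['$'] (s.length + 1) s [] [] = pvSplitD s
  rw [pv_splitOn_go s (s.length + 1) [] [] (by omega)]
  cases hS : pvSplitD s with
  | nil => exact absurd hS (pvSplitD_ne_nil s)
  | cons h r => simp

lemma pv_replace_go (s : List Char) : ∀ (fuel : Nat) (acc : List Char),
    s.length ≤ fuel →
    PySem.Chars.replace.go ['%'] ['\\', '%'] fuel s acc = acc.reverse ++ pvReplD s := by
  induction s with
  | nil =>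
    intro fuel acc hf
    cases fuel with
    | zero => simp [PySem.Chars.replace.go, pvReplD]
    | succ f => simp [PySem.Chars.replace.go, pvReplD]
  | cons c t ih =>
    intro fuel acc hf
    cases fuel with
    | zero => simp at hf
    | succ f =>
      by_cases hc : c = '%'
      · subst hc
        have e : PySem.Chars.replace.go ['%'] ['\\', '%'] (f + 1) ('%' :: t) acc =
            PySem.Chars.replace.go ['%'] ['\\', '%'] f t ('%' :: '\\' :: acc) := by
          simp [PySem.Chars.replace.go, List.isPrefixOf]
        rw [e, ih f ('%' :: '\\' :: acc) (by simp at hf; omega)]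
        simp [pvReplD]
      · have e : PySem.Chars.replace.go ['%'] ['\\', '%'] (f + 1) (c :: t) acc =
            PySem.Chars.replace.go ['%'] ['\\', '%'] f t (c :: acc) := by
          simp [PySem.Chars.replace.go, List.isPrefixOf]
          intro h; exact absurd h.symm hc
        rw [e, ih f (c :: acc) (by simp at hf; omega)]
        simp [pvReplD, hc]

lemma pv_replace_eq (s : List Char) : PySem.Chars.replace s ['%'] ['\\', '%'] = pvReplD s := by
  show PySem.Chars.replace s ['%'] ['\\', '%'] = pvReplD s
  have : PySem.Chars.replace s ['%'] ['\\', '%'] =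
      PySem.Chars.replace.go ['%'] ['\\', '%'] s.length s [] := by
    simp [PySem.Chars.replace]
  rw [this, pv_replace_go s s.length [] (by omega)]
  simp

lemma pvA_escape_acc (s : List Char) : ∀ (m : Bool) (out : List Char),
    pvA_escape s m out = out ++ pvE s m := by
  induction s with
  | nil => intro m out; simp [pvA_escape, pvE]
  | cons c t ih =>
    intro m out
    simp only [pvA_escape, pvE]
    split
    · rw [ih]; simp
    · split
      · rw [ih]; simp
      · rw [ih]; simp

lemma pv_join_cons (x : List Char) (L : List (List Char)) :
    PySem.Chars.join ['$'] (x :: L) = x ++ (match L with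
      | [] => ([] : List Char)
      | _ :: _ => '$' :: PySem.Chars.join ['$'] L) := by
  cases L with
  | nil => simp [PySem.Chars.join_singleton]
  | cons b bs => simp [PySem.Chars.join_cons_cons]

lemma pvReplD_cons (c : Char) (t : List Char) :
    pvReplD (c :: t) = (if c = '%' then ['\\', '%'] else [c]) ++ pvReplD t := by
  simp only [pvReplD]; split <;> simp

lemma pvE_join (s : List Char) : ∀ (m : Bool),
    pvE s m = PySem.Chars.join ['$'] (pvMapPar (!m) (pvSplitD s)) := by
  induction s with
  | nil => intro m; cases m <;> simp [pvE, pvSplitD, pvMapPar, pvReplD, PySem.Chars.join_singleton]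
  | cons c t ih =>
    intro m
    cases hs : pvSplitD t with
    | nil => exact absurd hs (pvSplitD_ne_nil t)
    | cons h r =>
      by_cases hc : c = '$'
      · subst hc
        simp only [pvE, pvSplitD, hs, pvMapPar, ih, Bool.not_not, if_pos]
        cases m <;> simp [pvReplD, PySem.Chars.join_cons_cons]
      · have hsplit : pvSplitD (c :: t) = (c :: h) :: r := by
          simp [pvSplitD, hc, hs]
        rw [hsplit]
        simp only [pvE, if_neg hc, ih m, hs, pvMapPar]
        cases m with
        | true =>
          simp only [Bool.not_true, Bool.and_false, Bool.false_eq_true, if_false]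
          rw [pv_join_cons, pv_join_cons]
          simp
        | false =>
          simp only [Bool.not_false, Bool.and_true, pvReplD_cons]
          rw [pv_join_cons, pv_join_cons]
          by_cases hp : c = '%'
          · rw [if_pos (by simp [hp]), if_pos hp]; simp
          · rw [if_neg (by simp [hp]), if_neg hp]; simp

lemma pv_enum_mapPar (segs : List (List Char)) : ∀ (k : Int), 0 ≤ k →
    (PySem.List.enumerate segs k).map
      (fun p => if PySem.Int.mod p.1 2 = 0 then PySem.Chars.replace p.2 ['%'] ['\\', '%'] else p.2) =
    pvMapPar (decide (PySem.Int.mod k 2 = 0)) segs := by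
  induction segs with
  | nil => intro k hk; simp [PySem.List.enumerate, pvMapPar]
  | cons h r ih =>
    intro k hk
    simp only [PySem.List.enumerate, List.map_cons, pvMapPar]
    rw [ih (k + 1) (by omega)]
    have e1 : PySem.Int.mod k 2 = k % 2 := PySem.Int.mod_eq_emod_of_pos (by omega)
    have e2 : PySem.Int.mod (k + 1) 2 = (k + 1) % 2 := PySem.Int.mod_eq_emod_of_pos (by omega)
    rw [e1, e2]
    by_cases hp : k % 2 = 0
    · have h2 : (k + 1) % 2 = 1 := by omega
      rw [if_pos hp]
      simp [hp, h2, pv_replace_eq]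
    · have h2 : (k + 1) % 2 = 0 := by omega
      rw [if_neg hp]
      simp [hp, h2]

-- the whole row transformation agrees
lemma pv_row_eq (row : List Char) :
    pvA_escape row false [] =
      PySem.Chars.join ['$'] ((PySem.List.enumerate (PySem.Chars.splitOn row ['$'])).map
        (fun p => if PySem.Int.mod p.1 2 = 0 then PySem.Chars.replace p.2 ['%'] ['\\', '%'] else p.2)) := by
  rw [pvA_escape_acc, pvE_join, pv_splitOn_eq, pv_enum_mapPar _ 0 (by omega)]
  simp [PySem.Int.mod]

-- A's loop after a toprule was seen at t < i is B's second search
lemma pvTopList : "\\toprule".toList = ['\\', 't', 'o', 'p', 'r', 'u', 'l', 'e'] := rfl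

lemma pvA_after (lines : List (List Char)) : ∀ (i t : Nat), t < i →
    pvA_findHeader lines i (some t) = (pvB_searchHeader lines).map (i + ·) := by
  induction lines with
  | nil => intro i t h; simp [pvA_findHeader, pvB_searchHeader]
  | cons line rest ih =>
    intro i t h
    by_cases htop : PySem.Chars.isIn ['\\', 't', 'o', 'p', 'r', 'u', 'l', 'e'] line = true
    · have e : pvA_findHeader (line :: rest) i (some t) = pvA_findHeader rest (i + 1) (some i) := by
        simp [pvA_findHeader, pvTopList, htop]
      rw [e, ih (i + 1) i (by omega)]
      cases hB : pvB_searchHeader rest with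
      | none => simp [pvB_searchHeader, pvTopList, htop, hB]
      | some j => simp [pvB_searchHeader, pvTopList, htop, hB]; omega
    · by_cases hamp : PySem.Chars.isIn ['&'] line = true
      · have e : pvA_findHeader (line :: rest) i (some t) = some i := by
          simp [pvA_findHeader, pvTopList, htop, hamp, h]
        rw [e]; simp [pvB_searchHeader, pvTopList, htop, hamp]
      · have e : pvA_findHeader (line :: rest) i (some t) = pvA_findHeader rest (i + 1) (some t) := by
          simp [pvA_findHeader, pvTopList, htop, hamp]
        rw [e, ih (i + 1) t (by omega)]
        cases hB : pvB_searchHeader rest with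
        | none => simp [pvB_searchHeader, pvTopList, htop, hamp, hB]
        | some j => simp [pvB_searchHeader, pvTopList, htop, hamp, hB]; omega

-- A's loop before any toprule is: find the first toprule, then continue after it
lemma pvA_before (lines : List (List Char)) : ∀ (i : Nat),
    pvA_findHeader lines i none =
      match lines.findIdx? (fun line => PySem.Chars.isIn "\\toprule".toList line) with
      | none => none
      | some k => pvA_findHeader (lines.drop (k + 1)) (i + k + 1) (some (i + k)) := by
  induction lines with
  | nil => intro i; simp [pvA_findHeader]
  | cons line rest ih =>
    intro i
    by_cases htop : PySem.Chars.isIn ['\\', 't', 'o', 'p', 'r', 'u', 'l', 'e'] line = true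
    · have e : pvA_findHeader (line :: rest) i none = pvA_findHeader rest (i + 1) (some i) := by
        simp [pvA_findHeader, pvTopList, htop]
      rw [e]
      simp [List.findIdx?_cons, pvTopList, htop]
    · have e : pvA_findHeader (line :: rest) i none = pvA_findHeader rest (i + 1) none := by
        simp [pvA_findHeader, pvTopList, htop]
      rw [e, ih (i + 1)]
      simp only [List.findIdx?_cons, pvTopList, htop]
      cases hf : rest.findIdx? (fun line => PySem.Chars.isIn ['\\', 't', 'o', 'p', 'r', 'u', 'l', 'e'] line) with
      | none => simp
      | some k =>
        show pvA_findHeader (List.drop (k + 1) rest) (i + 1 + k + 1) (some (i + 1 + k)) =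
          pvA_findHeader (List.drop (k + 1 + 1) (line :: rest)) (i + (k + 1) + 1) (some (i + (k + 1)))
        rw [List.drop_succ_cons]
        have h1 : i + (k + 1) + 1 = i + 1 + k + 1 := by omega
        have h2 : i + (k + 1) = i + 1 + k := by omega
        rw [h1, h2]

lemma pv_header_eq (lines : List (List Char)) :
    pvA_findHeader lines 0 none =
      match lines.findIdx? (fun line => PySem.Chars.isIn "\\toprule".toList line) with
      | none => none
      | some t => (pvB_searchHeader (lines.drop (t + 1))).map (t + 1 + ·) := by
  rw [pvA_before lines 0]
  cases hf : lines.findIdx? (fun line => PySem.Chars.isIn "\\toprule".toList line) with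
  | none => simp
  | some t =>
    simp only
    rw [pvA_after (lines.drop (t + 1)) (0 + t + 1) (0 + t) (by omega)]
    cases pvB_searchHeader (lines.drop (t + 1)) <;> simp

-- ===== VERDICT (by name: the statement is the Claim_ definition above) =====
theorem escape_header_percents_py_spec : Claim_equal_escape_header_percents_py := by
  intro latex_table _
  unfold Spec_escape_header_percents_py escape_header_percents_py escape_header_percents_py_alt
  simp only [pv_header_eq, pv_row_eq]
  cases (PySem.Chars.splitOn latex_table.toList "\n".toList).findIdx?
      (fun line => PySem.Chars.isIn "\\toprule".toList line) with
  | none => rfl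
  | some t =>
    cases pvB_searchHeader ((PySem.Chars.splitOn latex_table.toList "\n".toList).drop (t + 1)) with
    | none => rfl
    | some j => rfl
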